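-- pv_equiv track=rewrite | github.com/tris010/recruitment-system | backend/scheduler.py | pick_best_expert
-- ===== SOURCE A (Python) =====
-- from typing import List, Tuple
--
-- def skill_overlap(job_skills: List[str], expert_skills: List[str]) -> int:
--     js = set([s.strip().lower() for s in job_skills if s])
--     es = set([s.strip().lower() for s in expert_skills if s])
--     return len(js & es)
--
-- def pick_best_expert(job_skills: List[str], experts: List[Tuple[int, str]]) -> int:
--     # experts: list of (expert_id, skills_csv)
--     best_id = None
--     best_score = -1
--     for eid, csv in experts:
--         score = skill_overlap(job_skills, (csv or "").split(","))
--         if score > best_score: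
--             best_score = score
--             best_id = eid
--     return best_id
-- ===== SOURCE B (Python) =====
-- from typing import List, Tuple
--
-- def pick_best_expert(job_skills: List[str], experts: List[Tuple[int, str]]) -> int:
--     # Inverted index: one pass over the experts records, for every normalized
--     # skill, the bucket of expert indices holding it; then each deduplicated
--     # job skill distributes one point to its bucket; finally the first expert
--     # (input order) with the maximal score wins.
--     if not experts:
--         return None
--     index = {}
--     for i, (_eid, csv) in enumerate(experts):
--         for sk in {p.strip().lower() for p in (csv or "").split(",") if p}:
--             index.setdefault(sk, []).append(i)
--     scores = [0] * len(experts)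
--     for sk in {s.strip().lower() for s in job_skills if s}:
--         for i in index.get(sk, []):
--             scores[i] += 1
--     m = max(scores)
--     for (eid, _csv), sc in zip(experts, scores):
--         if sc == m:
--             return eid
-- ===== Notes on version B (the rewrite author's own statement) =====
-- stated objective: faster
-- what changed: A loops over experts, re-splitting, re-normalizing and intersecting the job-skill set per expert while tracking a running best; B builds an inverted index (dict skill -> bucket of expert indices) in one pass over the experts, then iterates over the deduplicated job skills distributing one point to every index in that skill's bucket, and finally returns the first expert with the maximal score.
import Mathlib
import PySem

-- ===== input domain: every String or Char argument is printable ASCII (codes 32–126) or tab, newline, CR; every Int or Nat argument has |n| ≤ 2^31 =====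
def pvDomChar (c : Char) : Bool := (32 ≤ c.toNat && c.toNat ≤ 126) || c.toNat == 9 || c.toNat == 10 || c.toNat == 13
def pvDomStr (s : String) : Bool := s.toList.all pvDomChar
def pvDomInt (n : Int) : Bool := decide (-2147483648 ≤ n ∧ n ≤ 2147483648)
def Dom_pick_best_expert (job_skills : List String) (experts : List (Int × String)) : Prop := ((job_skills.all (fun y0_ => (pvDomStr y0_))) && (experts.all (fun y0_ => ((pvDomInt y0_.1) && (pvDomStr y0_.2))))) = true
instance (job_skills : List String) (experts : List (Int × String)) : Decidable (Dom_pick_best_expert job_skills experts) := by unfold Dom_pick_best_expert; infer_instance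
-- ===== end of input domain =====

-- B replaces A's per-expert intersection loop (which renormalizes the job-skill set for every
-- expert) by an inverted index skill -> expert-index bucket filled once, with the job skills then
-- distributing points into a score table; same results on every input.

-- shared normalization helpers (the identical comprehensions appear in both Pythons)
-- s.strip().lower()
def pvNorm (s : String) : String := PySem.Str.lower (PySem.Str.strip s)
-- csv.split(","): the separator is the non-empty literal ",", so Str.split? is never none
def pvSplit (s : String) : List String := (PySem.Str.split? s ",").getD []
-- {x.strip().lower() for x in l if x}
def pvNormSet (l : List String) : PySem.Set String :=
  PySem.Set.ofList ((l.filter (fun s => !(s == ""))).map (fun s => pvNorm s))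

-- ===== PORT A =====
def skill_overlap (job_skills : List String) (expert_skills : List String) : Int :=
  let js := pvNormSet job_skills
  let es := pvNormSet expert_skills
  PySem.Set.len (PySem.Set.inter js es)

def pick_best_expert (job_skills : List String) (experts : List (Int × String)) : Option Int :=
  (experts.foldl
    (fun st p =>
      let score := skill_overlap job_skills (pvSplit p.2)
      if score > st.2 then (some p.1, score) else st)
    ((none : Option Int), (-1 : Int))).1

-- ===== PORT B =====
def pick_best_expert_alt (job_skills : List String) (experts : List (Int × String)) : Option Int :=
  if experts = [] then none
  else
    -- index.setdefault(sk, []).append(i)  ==  modify sk [] (· ++ [i])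
    let index : PySem.Dict String (List Int) :=
      (PySem.List.enumerate experts).foldl
        (fun d q =>
          (pvNormSet (pvSplit q.2.2)).foldl
            (fun d2 sk => d2.modify sk [] (fun l => l ++ [q.1])) d)
        PySem.Dict.empty
    let scores := (pvNormSet job_skills).foldl
      (fun sc sk =>
        (index.getD sk []).foldl
          (fun sc2 i => PySem.List.pySetD sc2 i (PySem.List.pyGetD sc2 i 0 + 1)) sc)
      (List.replicate experts.length (0 : Int))
    match PySem.List.max? scores (fun x => x) with
    | none => none
    | some m => ((experts.zip scores).find? (fun q => q.2 == m)).map (fun q => q.1.1)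

-- ===== PRECONDITION & SPEC =====
def Spec_pick_best_expert (job_skills : List String) (experts : List (Int × String)) (out : Option Int) : Prop := out = pick_best_expert_alt job_skills experts
instance (job_skills : List String) (experts : List (Int × String)) (out : Option Int) : Decidable (Spec_pick_best_expert job_skills experts out) := by unfold Spec_pick_best_expert; infer_instance

-- ===== CLAIM (what is proved, stated in full; the proofs are below) =====
def Claim_equal_pick_best_expert : Prop := ∀ (job_skills : List String) (experts : List (Int × String)), Dom_pick_best_expert job_skills experts → Spec_pick_best_expert job_skills experts (pick_best_expert job_skills experts)

-- ===== LEMMAS AND PROOFS =====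

-- a nested fold is a fold over the flattened list
theorem pv_foldl_foldl {α β γ : Type} (g : α → List β) (f : γ → β → γ) :
    ∀ (l : List α) (d : γ),
    l.foldl (fun d x => (g x).foldl f d) d = (l.flatMap g).foldl f d := by
  intro l
  induction l with
  | nil => intro d; simp
  | cons x l ih => intro d; simp [List.foldl_append, ih]

-- the bucket stored by the index-building loop: getD at sk lists, in order, the indices of the
-- experts whose normalized skill set holds sk
theorem pv_bucket (experts : List (Int × String)) (sk : String) :
    ((PySem.List.enumerate experts).foldl
        (fun d q =>
          (pvNormSet (pvSplit q.2.2)).foldl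
            (fun d2 sk => d2.modify sk [] (fun l => l ++ [q.1])) d)
        PySem.Dict.empty).getD sk []
    = (PySem.List.enumerate experts).flatMap
        (fun q => if (pvNormSet (pvSplit q.2.2)).contains sk then [q.1] else []) := by
  have h1 : ∀ (q : Int × (Int × String)) (d : PySem.Dict String (List Int)),
      (pvNormSet (pvSplit q.2.2)).foldl
          (fun d2 sk => d2.modify sk [] (fun l => l ++ [q.1])) d
      = ((pvNormSet (pvSplit q.2.2)).map (fun s => (s, q.1))).foldl
          (fun d2 p => d2.modify p.1 [] (fun l => l ++ [p.2])) d := by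
    intro q d
    rw [List.foldl_map]
  have hrw := PySem.List.foldl_congr_mem
    (l := PySem.List.enumerate experts) (init := (PySem.Dict.empty : PySem.Dict String (List Int)))
    (f := fun d q =>
      (pvNormSet (pvSplit q.2.2)).foldl (fun d2 sk => d2.modify sk [] (fun l => l ++ [q.1])) d)
    (g := fun d q =>
      ((pvNormSet (pvSplit q.2.2)).map (fun s => (s, q.1))).foldl
        (fun d2 p => d2.modify p.1 [] (fun l => l ++ [p.2])) d)
    (fun d q _ => h1 q d)
  rw [hrw]
  rw [pv_foldl_foldl]
  rw [PySem.Dict.getD_foldl_modify_append]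
  rw [PySem.Dict.getD_empty]
  rw [List.nil_append, List.filter_flatMap, List.map_flatMap]
  apply List.flatMap_congr
  intro q _
  rw [List.filter_map]
  have hfilter : (pvNormSet (pvSplit q.2.2)).filter
      (fun a => ((fun p : String × Int => p.1 == sk) ∘ fun s => (s, q.1)) a)
      = if sk ∈ pvNormSet (pvSplit q.2.2) then [sk] else [] := by
    have hnd : (pvNormSet (pvSplit q.2.2)).Nodup := PySem.Set.nodup_ofList _
    have : ((fun p : String × Int => p.1 == sk) ∘ fun s => (s, q.1)) = (fun s => s == sk) := by
      funext s; rfl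
    rw [this, List.filter_beq]
    by_cases hm : sk ∈ pvNormSet (pvSplit q.2.2)
    · rw [if_pos hm, List.count_eq_one_of_mem hnd hm]
      simp
    · rw [if_neg hm, List.count_eq_zero_of_not_mem hm]
      simp
  rw [hfilter]
  by_cases hc : sk ∈ pvNormSet (pvSplit q.2.2)
  · simp [hc]
  · simp [hc]

-- distributing one point to every index of a bucket is a pointwise map over the score table
theorem pv_inner (p : Int × String → Bool) :
    ∀ (es : List (Int × String)) (pre sc : List Int), sc.length = es.length →
    ((PySem.List.enumerate es (pre.length : Int)).flatMap
        (fun q => if p q.2 then [q.1] else [])).foldl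
      (fun sc2 i => PySem.List.pySetD sc2 i (PySem.List.pyGetD sc2 i 0 + 1)) (pre ++ sc)
    = pre ++ (sc.zip es).map (fun r => if p r.2 then r.1 + 1 else r.1) := by
  intro es
  induction es with
  | nil =>
    intro pre sc h
    simp at h
    simp [h, PySem.List.enumerate]
  | cons e es ih =>
    intro pre sc h
    match sc with
    | [] => simp at h
    | v :: sc' =>
      simp only [List.length_cons] at h
      rw [PySem.List.enumerate_cons]
      simp only [List.flatMap_cons, List.foldl_append]
      have hstep : ((if p e then [(pre.length : Int)] else []).foldl
            (fun sc2 i => PySem.List.pySetD sc2 i (PySem.List.pyGetD sc2 i 0 + 1))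
            (pre ++ v :: sc'))
          = pre ++ (if p e then v + 1 else v) :: sc' := by
        by_cases hc : p e
        · simp only [hc, if_true, List.foldl_cons, List.foldl_nil]
          rw [PySem.List.pyGetD_natCast, PySem.List.pySetD_natCast]
          have hg : (pre ++ v :: sc').getD pre.length 0 = v := by
            simp [List.getD_eq_getElem?_getD]
          rw [hg]
          rw [List.set_append_right _ _ (Nat.le_refl _)]
          simp
        · simp only [if_neg hc, List.foldl_nil]
      rw [hstep]
      have hlist : pre ++ (if p e then v + 1 else v) :: sc'
          = (pre ++ [if p e then v + 1 else v]) ++ sc' := by simp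
      have hlen : ((pre.length : Int) + 1) = (((pre ++ [if p e then v + 1 else v]).length : Nat) : Int) := by
        simp
      rw [hlist, hlen, ih _ sc' (by omega)]
      simp [List.zip_cons_cons]

-- pv_inner with an empty prefix
theorem pv_inner0 (p : Int × String → Bool) (es : List (Int × String)) (sc : List Int)
    (h : sc.length = es.length) :
    ((PySem.List.enumerate es).flatMap (fun q => if p q.2 then [q.1] else [])).foldl
      (fun sc2 i => PySem.List.pySetD sc2 i (PySem.List.pyGetD sc2 i 0 + 1)) sc
    = (sc.zip es).map (fun r => if p r.2 then r.1 + 1 else r.1) := by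
  have := pv_inner p es [] sc h
  simpa using this

-- the outer loop over the job skills accumulates, per expert, the number of matching job skills
theorem pv_outer (L : List String) :
    ∀ (es : List (Int × String)) (sc : List Int), sc.length = es.length →
    L.foldl
      (fun sc sk =>
        ((PySem.List.enumerate es).flatMap
            (fun q => if (pvNormSet (pvSplit q.2.2)).contains sk then [q.1] else [])).foldl
          (fun sc2 i => PySem.List.pySetD sc2 i (PySem.List.pyGetD sc2 i 0 + 1)) sc) sc
    = (sc.zip es).map
        (fun r => r.1 + ((L.filter (fun sk => (pvNormSet (pvSplit r.2.2)).contains sk)).length : Int)) := by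
  induction L with
  | nil =>
    intro es sc h
    simp only [List.foldl_nil, List.filter_nil, List.length_nil]
    apply List.ext_getElem
    · simp [h]
    · intro i h1 h2
      simp
  | cons sk L ih =>
    intro es sc h
    simp only [List.foldl_cons]
    rw [pv_inner0 (fun e => (pvNormSet (pvSplit e.2)).contains sk) es sc h]
    rw [ih es _ (by simp [h])]
    apply List.ext_getElem
    · simp [h]
    · intro i h1 h2
      have hi : i < es.length := by simp [h] at h2; omega
      simp only [List.getElem_map, List.getElem_zip] at *
      rw [List.filter_cons]
      by_cases hm : sk ∈ pvNormSet (pvSplit (es[i]'hi).2)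
      · simp [hm, PySem.Set.contains]
        ring
      · simp [hm, PySem.Set.contains]

-- A's best-so-far fold, characterized: running from (some e0, s) it returns the overall max and
-- the first pair achieving it
theorem pv_core :
    ∀ (rest : List (Int × Int)) (e0 s : Int), (∀ q ∈ rest, 0 ≤ q.2) → 0 ≤ s →
    rest.foldl (fun st q => if q.2 > st.2 then (some q.1, q.2) else st)
        ((some e0 : Option Int), s)
    = (Option.map Prod.fst
        (((e0, s) :: rest).find?
          (fun q => q.2 == (rest.map Prod.snd).foldl max s)),
       (rest.map Prod.snd).foldl max s) := by
  intro rest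
  induction rest with
  | nil =>
    intro e0 s _ _
    simp
  | cons q rest ih =>
    intro e0 s hq hs
    simp only [List.foldl_cons, List.map_cons]
    by_cases hlt : q.2 > s
    · have hmax : max s q.2 = q.2 := max_eq_right (le_of_lt hlt)
      rw [if_pos hlt,
        ih q.1 q.2 (fun r hr => hq r (List.mem_cons_of_mem _ hr)) (le_of_lt (lt_of_le_of_lt hs hlt)),
        hmax]
      have hMge : q.2 ≤ (rest.map Prod.snd).foldl max q.2 :=
        (PySem.List.le_foldl_max _ _).1
      refine congrArg₂ Prod.mk ?_ rfl
      have hne : ¬ s = List.foldl max q.2 (List.map Prod.snd rest) := by omega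
      rw [show (List.find? (fun q_1 : Int × Int => q_1.2 == List.foldl max q.2 (List.map Prod.snd rest)) ((e0, s) :: q :: rest))
           = List.find? (fun q_1 : Int × Int => q_1.2 == List.foldl max q.2 (List.map Prod.snd rest)) (q :: rest)
         from List.find?_cons_of_neg (by simpa using hne)]
    · have hle : q.2 ≤ s := by omega
      have hmax : max s q.2 = s := max_eq_left hle
      rw [if_neg hlt,
        ih e0 s (fun r hr => hq r (List.mem_cons_of_mem _ hr)) hs, hmax]
      set M := (rest.map Prod.snd).foldl max s with hMdef
      have hsM : s ≤ M := (PySem.List.le_foldl_max _ _).1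
      refine congrArg₂ Prod.mk ?_ rfl
      by_cases hsm : s = M
      · rw [List.find?_cons_of_pos (by simpa using hsm),
            List.find?_cons_of_pos (by simpa using hsm)]
      · rw [List.find?_cons_of_neg (by simpa using hsm),
            List.find?_cons_of_neg (by simpa using hsm),
            List.find?_cons_of_neg (by simp; omega)]

-- the per-expert score, shared shape of both sides
def pvScore (job_skills : List String) (p : Int × String) : Int :=
  (((pvNormSet job_skills).filter (fun sk => (pvNormSet (pvSplit p.2)).contains sk)).length : Int)

-- B's whole score computation produces exactly A's per-expert overlap counts, in expert order
theorem pv_scores_eq (job_skills : List String) (experts : List (Int × String)) :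
    (pvNormSet job_skills).foldl
      (fun sc sk =>
        (((PySem.List.enumerate experts).foldl
            (fun d q =>
              (pvNormSet (pvSplit q.2.2)).foldl
                (fun d2 sk => d2.modify sk [] (fun l => l ++ [q.1])) d)
            PySem.Dict.empty).getD sk []).foldl
          (fun sc2 i => PySem.List.pySetD sc2 i (PySem.List.pyGetD sc2 i 0 + 1)) sc)
      (List.replicate experts.length (0 : Int))
    = experts.map (pvScore job_skills) := by
  have hb : ∀ (sc : List Int) (sk : String),
      (((PySem.List.enumerate experts).foldl
          (fun d q =>
            (pvNormSet (pvSplit q.2.2)).foldl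
              (fun d2 sk => d2.modify sk [] (fun l => l ++ [q.1])) d)
          PySem.Dict.empty).getD sk []).foldl
        (fun sc2 i => PySem.List.pySetD sc2 i (PySem.List.pyGetD sc2 i 0 + 1)) sc
      = ((PySem.List.enumerate experts).flatMap
          (fun q => if (pvNormSet (pvSplit q.2.2)).contains sk then [q.1] else [])).foldl
        (fun sc2 i => PySem.List.pySetD sc2 i (PySem.List.pyGetD sc2 i 0 + 1)) sc := by
    intro sc sk
    rw [pv_bucket]
  have hrw := PySem.List.foldl_congr_mem
    (l := pvNormSet job_skills) (init := List.replicate experts.length (0 : Int))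
    (f := fun sc sk =>
      (((PySem.List.enumerate experts).foldl
          (fun d q =>
            (pvNormSet (pvSplit q.2.2)).foldl
              (fun d2 sk => d2.modify sk [] (fun l => l ++ [q.1])) d)
          PySem.Dict.empty).getD sk []).foldl
        (fun sc2 i => PySem.List.pySetD sc2 i (PySem.List.pyGetD sc2 i 0 + 1)) sc)
    (g := fun sc sk =>
      ((PySem.List.enumerate experts).flatMap
          (fun q => if (pvNormSet (pvSplit q.2.2)).contains sk then [q.1] else [])).foldl
        (fun sc2 i => PySem.List.pySetD sc2 i (PySem.List.pyGetD sc2 i 0 + 1)) sc)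
    (fun sc sk _ => hb sc sk)
  rw [hrw]
  rw [pv_outer _ _ _ (by simp)]
  apply List.ext_getElem
  · simp
  · intro i h1 h2
    simp [pvScore]

theorem pick_best_expert_spec' : ∀ (job_skills : List String) (experts : List (Int × String)),
    pick_best_expert job_skills experts = pick_best_expert_alt job_skills experts := by
  intro job experts
  have hf : ∀ p, 0 ≤ pvScore job p := fun p => Int.natCast_nonneg _
  have hA : pick_best_expert job experts
      = (experts.foldl (fun st p => if pvScore job p > st.2 then (some p.1, pvScore job p) else st)
          ((none : Option Int), (-1 : Int))).1 := by
    simp only [pick_best_expert, skill_overlap, PySem.Set.len, PySem.Set.inter, pvScore]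
  match experts with
  | [] => simp [pick_best_expert, pick_best_expert_alt]
  | x :: rest =>
    rw [hA]
    rw [pick_best_expert_alt, if_neg (by simp)]
    simp only [pv_scores_eq job (x :: rest)]
    -- B side: compute max? and the find
    set f := pvScore job with hfdef
    have hmap : (x :: rest).map f = f x :: rest.map f := by simp
    rw [hmap, PySem.List.max?_id_cons]
    set M := (rest.map f).foldl max (f x) with hMdef
    -- A side: first iteration then pv_core over the mapped pair list
    have hstep1 : ((x :: rest).foldl (fun st p => if f p > st.2 then (some p.1, f p) else st)
          ((none : Option Int), (-1 : Int)))
        = rest.foldl (fun st p => if f p > st.2 then (some p.1, f p) else st)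
            ((some x.1 : Option Int), f x) := by
      simp only [List.foldl_cons]
      rw [if_pos (by have := hf x; omega)]
    have hfold : rest.foldl (fun st p => if f p > st.2 then (some p.1, f p) else st)
            ((some x.1 : Option Int), f x)
        = (rest.map (fun p => (p.1, f p))).foldl
            (fun st q => if q.2 > st.2 then (some q.1, q.2) else st)
            ((some x.1 : Option Int), f x) := by
      rw [List.foldl_map]
    have hsnd : (rest.map (fun p => (p.1, f p))).map Prod.snd = rest.map f := by
      simp [List.map_map, Function.comp]
    rw [hstep1, hfold, pv_core _ x.1 (f x)
        (by intro q hq; simp only [List.mem_map] at hq; obtain ⟨p, _, rfl⟩ := hq; exact hf p)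
        (hf x)]
    rw [hsnd, ← hMdef]
    -- both sides are now find-first-with-score-M over the same list
    have hzip : ∀ (l : List (Int × String)), l.zip (l.map f) = l.map (fun p => (p, f p)) := by
      intro l
      induction l with
      | nil => simp
      | cons a t ih => simp [List.zip_cons_cons, ih]
    have hconsmap : ((x.1, f x) :: rest.map (fun p => (p.1, f p)))
        = (x :: rest).map (fun p => (p.1, f p)) := by simp
    rw [hconsmap]
    show Option.map Prod.fst (List.find? (fun q => q.2 == M) ((x :: rest).map (fun p => (p.1, f p))))
        = Option.map (fun q => q.1.1) (List.find? (fun q => q.2 == M) ((x :: rest).zip (f x :: List.map f rest)))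
    rw [← hmap, hzip, List.find?_map, List.find?_map, Option.map_map, Option.map_map]
    have hp1 : ((fun q : Int × Int => q.2 == M) ∘ (fun p : Int × String => (p.1, f p)))
        = fun p => f p == M := by funext p; rfl
    have hp2 : ((fun q : (Int × String) × Int => q.2 == M) ∘ (fun p : Int × String => (p, f p)))
        = fun p => f p == M := by funext p; rfl
    have hg1 : (Prod.fst ∘ (fun p : Int × String => (p.1, f p)))
        = fun p : Int × String => p.1 := by funext p; rfl
    have hg2 : ((fun q : (Int × String) × Int => q.1.1) ∘ (fun p : Int × String => (p, f p)))
        = fun p : Int × String => p.1 := by funext p; rfl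
    rw [hp1, hp2, hg1, hg2]

-- ===== VERDICT (by name: the statement is the Claim_ definition above) =====
theorem pick_best_expert_spec : Claim_equal_pick_best_expert := by
  intro job_skills experts _
  exact pick_best_expert_spec' job_skills experts
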